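-- pv_equiv track=rewrite | github.com/TG-Lim/Algorithm_interview | programmers/모의고사.py | solution
-- ===== SOURCE A (Python) =====
-- def generate_first(problem_num):
--     return [ i % 5 + 1 for i in range(problem_num)]
--
-- def generate_second(problem_num):
--     def make_num(i):
--         if i % 2 == 0:
--             return 2
--         elif i % 8 == 1:
--             return 1
--         elif i % 8 == 3:
--             return 3
--         elif i % 8 == 5:
--             return 4
--         elif i % 8 == 7:
--             return 5
--
--     return [make_num(i) for i in range(problem_num)]
--
-- def generate_third(problem_num):
--     mapping = {
--         (0, 1): 3,
--         (2, 3): 1,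
--         (4, 5): 2,
--         (6, 7): 4,
--         (8, 9): 5
--     }
--
--     def make_num2(j):
--         index = j % 10
--         for key in mapping:
--             if index in key:
--                 return mapping[key]
--
--     return [make_num2(j) for j in range(problem_num)]
--
-- def solution(answers):
--     problem_num = len(answers)
--     first = generate_first(problem_num)
--     second = generate_second(problem_num)
--     third = generate_third(problem_num)
--
--     first_score = sum([1 for i in range(problem_num) if answers[i] == first[i]])
--     second_score = sum([1 for i in range(problem_num) if answers[i] == second[i]])
--     third_score = sum([1 for i in range(problem_num) if answers[i] == third[i]])
--
--     scores = [first_score, second_score, third_score]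
--     max_score = max(scores)
--     answer = [i + 1 for i in range(3) if scores[i] == max_score]
--
--     return answer
-- ===== SOURCE B (Python) =====
-- def solution(answers):
--     # Histogram algorithm: one pattern-independent pass builds a frequency table
--     # keyed by (position mod 40, answer) -- 40 = lcm of the three pattern periods.
--     # Each student's score is then a fixed 40-lookup sum; no per-element pattern compare.
--     tally = {}
--     for i, a in enumerate(answers):
--         k = (i % 40, a)
--         tally[k] = tally.get(k, 0) + 1
--     patterns = [[1, 2, 3, 4, 5],
--                 [2, 1, 2, 3, 2, 4, 2, 5],
--                 [3, 3, 1, 1, 2, 2, 4, 4, 5, 5]]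
--     scores = [sum(tally.get((r, p[r % len(p)]), 0) for r in range(40)) for p in patterns]
--     best = max(scores)
--     return [i + 1 for i in range(3) if scores[i] == best]
-- ===== Notes on version B (the rewrite author's own statement) =====
-- stated objective: alternative
-- what changed: Replaces A's per-student pattern materialisation and per-index comparison passes by a histogram algorithm: one pattern-independent pass builds a frequency table keyed by (index mod 40, answer), and each score is a fixed 40-entry table-lookup sum.
import Mathlib
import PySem

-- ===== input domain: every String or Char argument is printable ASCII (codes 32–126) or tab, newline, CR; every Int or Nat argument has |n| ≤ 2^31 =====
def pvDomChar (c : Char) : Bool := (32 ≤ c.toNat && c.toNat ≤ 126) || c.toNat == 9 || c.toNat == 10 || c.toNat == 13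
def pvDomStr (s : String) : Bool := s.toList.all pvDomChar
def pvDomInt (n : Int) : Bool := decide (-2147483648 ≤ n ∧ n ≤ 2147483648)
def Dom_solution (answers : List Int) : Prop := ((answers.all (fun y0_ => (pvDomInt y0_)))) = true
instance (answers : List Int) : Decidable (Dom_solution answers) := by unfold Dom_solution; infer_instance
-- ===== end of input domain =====

-- B replaces A's three materialised pattern lists and per-index comparison passes by a histogram
-- algorithm: one pattern-independent pass builds a frequency table keyed by (index mod 40, answer),
-- then each student's score is a fixed 40-entry table-lookup sum (objective: alternative).

-- ===== PORT A =====
def pvGenFirst (n : Int) : List Int :=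
  (PySem.List.pyRange 0 n 1).map (fun i => PySem.Int.mod i 5 + 1)

def pvMakeNum (i : Int) : Option Int :=
  if PySem.Int.mod i 2 = 0 then some 2
  else if PySem.Int.mod i 8 = 1 then some 1
  else if PySem.Int.mod i 8 = 3 then some 3
  else if PySem.Int.mod i 8 = 5 then some 4
  else if PySem.Int.mod i 8 = 7 then some 5
  else none   -- Python's make_num falls through to None here (unreachable)

def pvGenSecond (n : Int) : List (Option Int) :=
  (PySem.List.pyRange 0 n 1).map pvMakeNum

-- the dict lookup loop of make_num2, branch for branch in the dict's insertion order
def pvMakeNum2 (j : Int) : Option Int :=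
  let index := PySem.Int.mod j 10
  if index = 0 ∨ index = 1 then some 3
  else if index = 2 ∨ index = 3 then some 1
  else if index = 4 ∨ index = 5 then some 2
  else if index = 6 ∨ index = 7 then some 4
  else if index = 8 ∨ index = 9 then some 5
  else none   -- Python's make_num2 falls through to None here (unreachable)

def pvGenThird (n : Int) : List (Option Int) :=
  (PySem.List.pyRange 0 n 1).map pvMakeNum2

def solution (answers : List Int) : List Int :=
  let n : Int := (answers.length : Int)
  let first := pvGenFirst n
  let second := pvGenSecond n
  let third := pvGenThird n
  let firstScore : Int :=
    (((PySem.List.pyRange 0 n 1).filter (fun i =>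
        match PySem.List.pyGet? answers i, PySem.List.pyGet? first i with
        | some a, some v => v == a
        | _, _ => false)).map (fun _ => (1 : Int))).sum
  let secondScore : Int :=
    (((PySem.List.pyRange 0 n 1).filter (fun i =>
        match PySem.List.pyGet? answers i, PySem.List.pyGet? second i with
        | some a, some v => v == some a   -- int == Optional[int]: equal iff the entry is that int
        | _, _ => false)).map (fun _ => (1 : Int))).sum
  let thirdScore : Int :=
    (((PySem.List.pyRange 0 n 1).filter (fun i =>
        match PySem.List.pyGet? answers i, PySem.List.pyGet? third i with
        | some a, some v => v == some a
        | _, _ => false)).map (fun _ => (1 : Int))).sum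
  let scores : List Int := [firstScore, secondScore, thirdScore]
  match PySem.List.max? scores id with
  | some maxScore =>
      ((PySem.List.pyRange 0 3 1).filter (fun i =>
        PySem.List.pyGet? scores i == some maxScore)).map (fun i => i + 1)
  | none => []   -- unreachable: scores is a three-element literal

-- ===== PORT B =====
-- sum(tally.get((r, p[r % len(p)]), 0) for r in range(40))
def pvScoreB (tally : PySem.Dict (Int × Int) Int) (p : List Int) : Int :=
  ((PySem.List.pyRange 0 40 1).map (fun r =>
      tally.getD (r, PySem.List.pyGetD p (PySem.Int.mod r (p.length : Int)) 0) 0)).sum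

def solution_alt (answers : List Int) : List Int :=
  -- one pass: tally[(i % 40, a)] = tally.get((i % 40, a), 0) + 1
  let tally := (PySem.List.enumerate answers 0).foldl
      (fun d ia => d.insert (PySem.Int.mod ia.1 40, ia.2)
          (d.getD (PySem.Int.mod ia.1 40, ia.2) 0 + 1)) PySem.Dict.empty
  let patterns : List (List Int) :=
    [[1, 2, 3, 4, 5], [2, 1, 2, 3, 2, 4, 2, 5], [3, 3, 1, 1, 2, 2, 4, 4, 5, 5]]
  let scores := patterns.map (pvScoreB tally)
  let best := match PySem.List.max? scores id with
    | some m => m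
    | none => 0   -- unreachable: scores has three elements
  ((PySem.List.pyRange 0 3 1).filter (fun i =>
      PySem.List.pyGetD scores i 0 == best)).map (fun i => i + 1)

-- ===== PRECONDITION & SPEC =====
def Spec_solution (answers : List Int) (out : List Int) : Prop := out = solution_alt answers
instance (answers : List Int) (out : List Int) : Decidable (Spec_solution answers out) := by unfold Spec_solution; infer_instance

-- ===== CLAIM (what is proved, stated in full; the proofs are below) =====
def Claim_equal_solution : Prop := ∀ (answers : List Int), Dom_solution answers → Spec_solution answers (solution answers)

-- ===== LEMMAS AND PROOFS =====

-- the three cyclic pattern values, position i ↦ pattern[i % period]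
def pvK1 (i : Int) : Int := PySem.List.pyGetD [1, 2, 3, 4, 5] (PySem.Int.mod i 5) 0
def pvK2 (i : Int) : Int := PySem.List.pyGetD [2, 1, 2, 3, 2, 4, 2, 5] (PySem.Int.mod i 8) 0
def pvK3 (i : Int) : Int := PySem.List.pyGetD [3, 3, 1, 1, 2, 2, 4, 4, 5, 5] (PySem.Int.mod i 10) 0

-- pointwise: A's generators produce exactly the cycle values
lemma pvGen1_eq (i : Int) : PySem.Int.mod i 5 + 1 = pvK1 i := by
  have h0 : 0 ≤ PySem.Int.mod i 5 := PySem.Int.mod_nonneg i (by norm_num)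
  have h1 : PySem.Int.mod i 5 < 5 := PySem.Int.mod_lt i (by norm_num)
  unfold pvK1
  set r := PySem.Int.mod i 5 with hr
  have : r = 0 ∨ r = 1 ∨ r = 2 ∨ r = 3 ∨ r = 4 := by omega
  rcases this with h|h|h|h|h <;> rw [h] <;> decide

lemma pvMod2_of_mod8 (i : Int) : PySem.Int.mod i 2 = PySem.Int.mod (PySem.Int.mod i 8) 2 := by
  rw [PySem.Int.mod_eq_emod_of_pos (by norm_num), PySem.Int.mod_eq_emod_of_pos (by norm_num),
    PySem.Int.mod_eq_emod_of_pos (by norm_num), Int.emod_emod_of_dvd i (by norm_num)]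

lemma pvGen2_eq (i : Int) : pvMakeNum i = some (pvK2 i) := by
  have h0 : 0 ≤ PySem.Int.mod i 8 := PySem.Int.mod_nonneg i (by norm_num)
  have h1 : PySem.Int.mod i 8 < 8 := PySem.Int.mod_lt i (by norm_num)
  unfold pvMakeNum pvK2
  rw [pvMod2_of_mod8]
  set r := PySem.Int.mod i 8 with hr
  have : r = 0 ∨ r = 1 ∨ r = 2 ∨ r = 3 ∨ r = 4 ∨ r = 5 ∨ r = 6 ∨ r = 7 := by omega
  rcases this with h|h|h|h|h|h|h|h <;> rw [h] <;> decide

lemma pvGen3_eq (j : Int) : pvMakeNum2 j = some (pvK3 j) := by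
  have h0 : 0 ≤ PySem.Int.mod j 10 := PySem.Int.mod_nonneg j (by norm_num)
  have h1 : PySem.Int.mod j 10 < 10 := PySem.Int.mod_lt j (by norm_num)
  unfold pvMakeNum2 pvK3
  set r := PySem.Int.mod j 10 with hr
  have : r = 0 ∨ r = 1 ∨ r = 2 ∨ r = 3 ∨ r = 4 ∨ r = 5 ∨ r = 6 ∨ r = 7 ∨ r = 8 ∨ r = 9 := by omega
  rcases this with h|h|h|h|h|h|h|h|h|h <;> rw [h] <;> decide

-- the common counting spec: matches of xs (starting at position s) against cycle f
def pvCnt (f : Int → Int) : List Int → Int → Int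
  | [], _ => 0
  | x :: xs, s => (if x = f s then 1 else 0) + pvCnt f xs (s + 1)

-- A's range-indexed count equals the spec count
lemma pvCnt_eq_range (xs : List Int) : ∀ (f : Int → Int) (s : Int),
    pvCnt f xs s = ((List.range xs.length).countP (fun k => xs.getD k 0 == f (s + k)) : Int) := by
  induction xs with
  | nil => intro f s; simp [pvCnt]
  | cons x xs ih =>
    intro f s
    simp only [pvCnt, List.length_cons, List.range_succ_eq_map, List.countP_cons, List.countP_map]
    rw [ih]
    have hcomp : ((fun k => (x :: xs).getD k 0 == f (s + (k : Int))) ∘ Nat.succ)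
        = fun k => xs.getD k 0 == f (s + 1 + (k : Int)) := by
      funext k
      simp only [Function.comp_apply, List.getD_cons_succ, Nat.succ_eq_add_one, Nat.cast_add,
        Nat.cast_one]
      have h : s + ((k : Int) + 1) = s + 1 + (k : Int) := by ring
      rw [h]
    rw [hcomp]
    simp only [List.getD_cons_zero, Nat.cast_zero, add_zero]
    by_cases h : x = f s <;> simp [h, beq_iff_eq]
    omega

-- max of a three-element list
lemma pvMax3 (a b c : Int) : PySem.List.max? [a, b, c] id = some (max a (max b c)) := by
  simp only [PySem.List.max?, List.foldl, id]
  by_cases hab : a < b <;>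
    simp only [hab, if_true, if_false] <;>
    split_ifs <;> simp only [Option.some.injEq] <;> omega

-- the final selection steps agree once the scores are the same
lemma pvFinal (a b c m : Int) :
    ((PySem.List.pyRange 0 3 1).filter (fun i =>
        PySem.List.pyGet? [a, b, c] i == some m)).map (fun i => i + 1)
    = ((PySem.List.pyRange 0 3 1).filter (fun i =>
        PySem.List.pyGetD [a, b, c] i 0 == m)).map (fun i => i + 1) := by
  have hr : PySem.List.pyRange 0 3 1 = [0, 1, 2] := by decide
  have g0 : PySem.List.pyGet? [a, b, c] 0 = some a := rfl
  have g1 : PySem.List.pyGet? [a, b, c] 1 = some b := rfl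
  have g2 : PySem.List.pyGet? [a, b, c] 2 = some c := rfl
  have d0 : PySem.List.pyGetD [a, b, c] 0 0 = a := rfl
  have d1 : PySem.List.pyGetD [a, b, c] 1 0 = b := rfl
  have d2 : PySem.List.pyGetD [a, b, c] 2 0 = c := rfl
  rw [hr]
  simp only [List.filter_cons, List.filter_nil, g0, g1, g2, d0, d1, d2,
    beq_iff_eq, Option.some.injEq]

-- pyGet? commutes with map (no PySem lemma covers pyGet? over map)
lemma pvGet?_map {α β : Type} (f : α → β) (l : List α) (i : Int) :
    PySem.List.pyGet? (l.map f) i = (PySem.List.pyGet? l i).map f := by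
  simp [PySem.List.pyGet?, Option.map_bind]

-- A's first score equals the spec count
lemma pvScoreA1 (xs : List Int) :
    (((PySem.List.pyRange 0 (xs.length : Int) 1).filter (fun i =>
        match PySem.List.pyGet? xs i, PySem.List.pyGet? (pvGenFirst (xs.length : Int)) i with
        | some a, some v => v == a
        | _, _ => false)).map (fun _ => (1 : Int))).sum = pvCnt pvK1 xs 0 := by
  rw [PySem.List.sum_map_const_int, mul_one, ← List.countP_eq_length_filter,
    pvCnt_eq_range xs pvK1 0, PySem.List.pyRange_zero_nat, List.countP_map]
  congr 1
  apply List.countP_congr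
  intro k hk
  have hk' : k < xs.length := List.mem_range.mp hk
  have h1 : PySem.List.pyGet? xs (k : Int) = some xs[k] := by
    rw [PySem.List.pyGet?_natCast, List.getElem?_eq_getElem hk']
  have h2 : PySem.List.pyGet? (pvGenFirst (xs.length : Int)) (k : Int) = some (pvK1 (0 + k)) := by
    rw [pvGenFirst, pvGet?_map, PySem.List.pyGet?_natCast, PySem.List.getElem?_pyRange_one]
    simp only [sub_zero, Int.toNat_natCast, hk', if_true, Option.map_some, pvGen1_eq]
  simp only [Function.comp_apply, h1, h2, beq_iff_eq, List.getD_eq_getElem?_getD,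
    List.getElem?_eq_getElem hk', Option.getD_some]
  constructor <;> intro h <;> omega

-- A's second score equals the spec count
lemma pvScoreA2 (xs : List Int) :
    (((PySem.List.pyRange 0 (xs.length : Int) 1).filter (fun i =>
        match PySem.List.pyGet? xs i, PySem.List.pyGet? (pvGenSecond (xs.length : Int)) i with
        | some a, some v => v == some a
        | _, _ => false)).map (fun _ => (1 : Int))).sum = pvCnt pvK2 xs 0 := by
  rw [PySem.List.sum_map_const_int, mul_one, ← List.countP_eq_length_filter,
    pvCnt_eq_range xs pvK2 0, PySem.List.pyRange_zero_nat, List.countP_map]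
  congr 1
  apply List.countP_congr
  intro k hk
  have hk' : k < xs.length := List.mem_range.mp hk
  have h1 : PySem.List.pyGet? xs (k : Int) = some xs[k] := by
    rw [PySem.List.pyGet?_natCast, List.getElem?_eq_getElem hk']
  have h2 : PySem.List.pyGet? (pvGenSecond (xs.length : Int)) (k : Int)
      = some (some (pvK2 (0 + k))) := by
    rw [pvGenSecond, pvGet?_map, PySem.List.pyGet?_natCast, PySem.List.getElem?_pyRange_one]
    simp only [sub_zero, Int.toNat_natCast, hk', if_true, Option.map_some, pvGen2_eq]
  simp only [Function.comp_apply, h1, h2, beq_iff_eq, Option.some.injEq,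
    List.getD_eq_getElem?_getD, List.getElem?_eq_getElem hk', Option.getD_some]
  constructor <;> intro h <;> omega

-- A's third score equals the spec count
lemma pvScoreA3 (xs : List Int) :
    (((PySem.List.pyRange 0 (xs.length : Int) 1).filter (fun i =>
        match PySem.List.pyGet? xs i, PySem.List.pyGet? (pvGenThird (xs.length : Int)) i with
        | some a, some v => v == some a
        | _, _ => false)).map (fun _ => (1 : Int))).sum = pvCnt pvK3 xs 0 := by
  rw [PySem.List.sum_map_const_int, mul_one, ← List.countP_eq_length_filter,
    pvCnt_eq_range xs pvK3 0, PySem.List.pyRange_zero_nat, List.countP_map]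
  congr 1
  apply List.countP_congr
  intro k hk
  have hk' : k < xs.length := List.mem_range.mp hk
  have h1 : PySem.List.pyGet? xs (k : Int) = some xs[k] := by
    rw [PySem.List.pyGet?_natCast, List.getElem?_eq_getElem hk']
  have h2 : PySem.List.pyGet? (pvGenThird (xs.length : Int)) (k : Int)
      = some (some (pvK3 (0 + k))) := by
    rw [pvGenThird, pvGet?_map, PySem.List.pyGet?_natCast, PySem.List.getElem?_pyRange_one]
    simp only [sub_zero, Int.toNat_natCast, hk', if_true, Option.map_some, pvGen3_eq]
  simp only [Function.comp_apply, h1, h2, beq_iff_eq, Option.some.injEq,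
    List.getD_eq_getElem?_getD, List.getElem?_eq_getElem hk', Option.getD_some]
  constructor <;> intro h <;> omega

-- ===== B-side: histogram lemmas =====

lemma pvIndZero (q : Int → Int) (c x : Int) (l : List Int) (hc : c ∉ l) :
    (l.map (fun r => if (r, q r) = (c, x) then (1 : Int) else 0)).sum = 0 := by
  induction l with
  | nil => simp
  | cons a l ih =>
    have ha : a ≠ c := by rintro rfl; exact hc List.mem_cons_self
    simp only [List.map_cons, List.sum_cons, ih (fun h => hc (List.mem_cons_of_mem _ h))]
    simp [Prod.ext_iff, ha]

lemma pvIndOne (q : Int → Int) (c x : Int) (l : List Int) (hnd : l.Nodup) (hc : c ∈ l) :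
    (l.map (fun r => if (r, q r) = (c, x) then (1 : Int) else 0)).sum
      = if q c = x then 1 else 0 := by
  induction l with
  | nil => cases hc
  | cons a l ih =>
    simp only [List.map_cons, List.sum_cons]
    by_cases hac : a = c
    · subst hac
      rw [pvIndZero q a x l (List.nodup_cons.mp hnd).1]
      simp [Prod.ext_iff]
    · have h : c ∈ l := by
        rcases List.mem_cons.mp hc with h | h
        · exact absurd h.symm hac
        · exact h
      rw [ih (List.nodup_cons.mp hnd).2 h]
      simp [Prod.ext_iff, hac]

-- count over a cons, cast to Int
lemma pvCountConsInt (k b : Int × Int) (l : List (Int × Int)) :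
    (((b :: l).count k : ℕ) : Int)
    = ((l.count k : ℕ) : Int) + (if k = b then (1 : Int) else 0) := by
  rw [List.count_cons]
  push_cast [apply_ite (fun n : ℕ => (n : Int))]
  by_cases h : k = b
  · simp [h]
  · simp [h, Ne.symm h]

lemma pvSumSplit {α : Type} (f g h : α → Int) (hp : ∀ r, f r = g r + h r) (l : List α) :
    (l.map f).sum = (l.map g).sum + (l.map h).sum := by
  induction l with
  | nil => simp
  | cons a l ih => simp only [List.map_cons, List.sum_cons, ih, hp]; ring

-- the histogram-lookup sum computes the spec count, for any pattern whose period divides 40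
lemma pvHistSum (p : List Int) (hdvd : ((p.length : Int)) ∣ 40) (hpos : 0 < (p.length : Int))
    (xs : List Int) : ∀ s : Int,
    ((PySem.List.pyRange 0 40 1).map (fun r =>
        ((((PySem.List.enumerate xs s).map (fun ia => (PySem.Int.mod ia.1 40, ia.2))).count
           (r, PySem.List.pyGetD p (PySem.Int.mod r (p.length : Int)) 0) : Int)))).sum
    = pvCnt (fun i => PySem.List.pyGetD p (PySem.Int.mod i (p.length : Int)) 0) xs s := by
  induction xs with
  | nil => intro s; simp [PySem.List.enumerate, pvCnt]
  | cons x xs ih =>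
    intro s
    simp only [PySem.List.enumerate_cons, List.map_cons]
    rw [pvSumSplit _
        (fun r : Int =>
          (((PySem.List.enumerate xs (s + 1)).map (fun ia => (PySem.Int.mod ia.1 40, ia.2))).count
             (r, PySem.List.pyGetD p (PySem.Int.mod r (p.length : Int)) 0) : Int))
        (fun r : Int =>
          if (r, PySem.List.pyGetD p (PySem.Int.mod r (p.length : Int)) 0)
            = (PySem.Int.mod s 40, x) then (1 : Int) else 0)
        (fun r => pvCountConsInt _ _ _) _]
    rw [ih (s + 1)]
    have hmem : PySem.Int.mod s 40 ∈ PySem.List.pyRange 0 40 1 := by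
      have h0 : 0 ≤ PySem.Int.mod s 40 := PySem.Int.mod_nonneg s (by norm_num)
      have h1 : PySem.Int.mod s 40 < 40 := PySem.Int.mod_lt s (by norm_num)
      rw [PySem.List.mem_pyRange_one]; omega
    have hnd : (PySem.List.pyRange 0 40 1).Nodup := by decide
    rw [pvIndOne _ _ _ _ hnd hmem]
    have hmm : PySem.Int.mod (PySem.Int.mod s 40) (p.length : Int)
        = PySem.Int.mod s (p.length : Int) := by
      rw [PySem.Int.mod_eq_emod_of_pos (by norm_num : (0 : Int) < 40),
        PySem.Int.mod_eq_emod_of_pos hpos, PySem.Int.mod_eq_emod_of_pos hpos,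
        Int.emod_emod_of_dvd s hdvd]
    rw [hmm]
    simp only [pvCnt]
    by_cases h : x = PySem.List.pyGetD p (PySem.Int.mod s (p.length : Int)) 0 <;>
      simp [h, eq_comm] <;> omega

-- the fold of B's one pass is Counter of the keyed enumerate list
lemma pvTally (xs : List Int) :
    (PySem.List.enumerate xs 0).foldl
        (fun d ia => d.insert (PySem.Int.mod ia.1 40, ia.2)
            (d.getD (PySem.Int.mod ia.1 40, ia.2) 0 + 1)) PySem.Dict.empty
      = PySem.Dict.counter
          ((PySem.List.enumerate xs 0).map (fun ia => (PySem.Int.mod ia.1 40, ia.2))) := by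
  rw [← PySem.Dict.foldl_insert_getD_add_one_eq_counter, List.foldl_map]

-- B's score of a pattern is the spec count
lemma pvScoreB_eq (xs p : List Int) (hdvd : ((p.length : Int)) ∣ 40)
    (hpos : 0 < (p.length : Int)) :
    pvScoreB ((PySem.List.enumerate xs 0).foldl
        (fun d ia => d.insert (PySem.Int.mod ia.1 40, ia.2)
            (d.getD (PySem.Int.mod ia.1 40, ia.2) 0 + 1)) PySem.Dict.empty) p
      = pvCnt (fun i => PySem.List.pyGetD p (PySem.Int.mod i (p.length : Int)) 0) xs 0 := by
  rw [pvTally, pvScoreB]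
  simp only [PySem.Dict.getD_counter]
  exact pvHistSum p hdvd hpos xs 0

-- ===== VERDICT (by name: the statement is the Claim_ definition above) =====
theorem solution_spec : Claim_equal_solution := by
  intro answers _
  unfold Spec_solution
  simp only [solution, solution_alt, List.map_cons, List.map_nil]
  rw [pvScoreA1 answers, pvScoreA2 answers, pvScoreA3 answers]
  rw [pvScoreB_eq answers [1, 2, 3, 4, 5] (by norm_num) (by norm_num),
    pvScoreB_eq answers [2, 1, 2, 3, 2, 4, 2, 5] (by norm_num) (by norm_num),
    pvScoreB_eq answers [3, 3, 1, 1, 2, 2, 4, 4, 5, 5] (by norm_num) (by norm_num)]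
  have e1 : (fun i => PySem.List.pyGetD [1, 2, 3, 4, 5] (PySem.Int.mod i (([1,2,3,4,5] : List Int).length : Int)) 0) = pvK1 := by funext i; rfl
  have e2 : (fun i => PySem.List.pyGetD [2, 1, 2, 3, 2, 4, 2, 5] (PySem.Int.mod i (([2,1,2,3,2,4,2,5] : List Int).length : Int)) 0) = pvK2 := by funext i; rfl
  have e3 : (fun i => PySem.List.pyGetD [3, 3, 1, 1, 2, 2, 4, 4, 5, 5] (PySem.Int.mod i (([3,3,1,1,2,2,4,4,5,5] : List Int).length : Int)) 0) = pvK3 := by funext i; rfl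
  rw [e1, e2, e3, pvMax3]
  exact pvFinal _ _ _ _
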